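-- pv_equiv track=rewrite | github.com/AlexCh1975/PythonSeminar_5 | task_002/5_2.py | creating_list_lists
-- ===== SOURCE A (Python) =====
-- def creating_list_lists(nums: list):
--     numbers = []
--
--     for i in range(len(nums)):
--         some = nums[i]
--         temp = [some]
--         for j in range(i + 1, len(nums)):
--             if nums[j] > some:
--                 temp.append(nums[j])
--                 some = nums[j]
--         if len(temp) > 1:
--             numbers.append(temp)
--
--     return numbers
-- ===== SOURCE B (Python) =====
-- def creating_list_lists(nums: list):
--     # Right-to-left DP: the greedy increasing chain starting at i is
--     # nums[i] followed by the chain of the next suffix with its leading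
--     # elements <= nums[i] dropped.  One backward pass sharing suffix work.
--     rows = []
--     prev = []
--     for x in reversed(nums):
--         while prev and prev[0] <= x:
--             prev = prev[1:]
--         prev = [x] + prev
--         rows.append(prev)
--     rows.reverse()
--     return [r for r in rows if len(r) > 1]
-- ===== Notes on version B (the rewrite author's own statement) =====
-- stated objective: alternative
-- what changed: Replaces the nested forward rescans (one greedy scan per start index) with a single right-to-left pass that derives each start's chain from the next suffix's chain by dropping its leading elements <= the new head, sharing suffixes.
import Mathlib
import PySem

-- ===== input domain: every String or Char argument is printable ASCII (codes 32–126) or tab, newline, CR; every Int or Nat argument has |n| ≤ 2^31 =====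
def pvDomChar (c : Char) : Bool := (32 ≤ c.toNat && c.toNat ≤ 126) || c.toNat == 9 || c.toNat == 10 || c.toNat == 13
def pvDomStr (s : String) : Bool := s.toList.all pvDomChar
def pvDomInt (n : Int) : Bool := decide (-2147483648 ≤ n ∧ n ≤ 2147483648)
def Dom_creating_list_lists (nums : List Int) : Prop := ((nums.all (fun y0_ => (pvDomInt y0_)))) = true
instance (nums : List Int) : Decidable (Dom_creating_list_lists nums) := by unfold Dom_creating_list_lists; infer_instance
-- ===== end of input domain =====

-- B replaces A's per-start forward rescans with one right-to-left pass that builds each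
-- start's chain from the next suffix's chain (alternative decomposition; not claimed faster).

-- ===== PORT A =====
def creating_list_lists (nums : List Int) : List (List Int) :=
  (PySem.List.pyRange 0 (PySem.List.len nums) 1).foldl
    (fun numbers i =>
      let some0 := PySem.List.pyGetD nums i 0
      let st := (PySem.List.pyRange (i + 1) (PySem.List.len nums) 1).foldl
        (fun (p : Int × List Int) j =>
          let x := PySem.List.pyGetD nums j 0
          if x > p.1 then (x, p.2 ++ [x]) else p)
        (some0, [some0])
      if st.2.length > 1 then numbers ++ [st.2] else numbers)
    []

-- ===== PORT B =====
-- the `while prev and prev[0] <= x: prev = prev[1:]` loop of Source B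
def pvDropLe (x : Int) : List Int → List Int
  | [] => []
  | y :: ys => if y ≤ x then pvDropLe x ys else y :: ys

def creating_list_lists_alt (nums : List Int) : List (List Int) :=
  let st := nums.reverse.foldl
    (fun (st : List Int × List (List Int)) x =>
      let prev := x :: pvDropLe x st.1
      (prev, st.2 ++ [prev]))
    ([], [])
  st.2.reverse.filter (fun r => decide (r.length > 1))

-- ===== PRECONDITION & SPEC =====
def Spec_creating_list_lists (nums : List Int) (out : List (List Int)) : Prop := out = creating_list_lists_alt nums
instance (nums : List Int) (out : List (List Int)) : Decidable (Spec_creating_list_lists nums out) := by unfold Spec_creating_list_lists; infer_instance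

-- ===== CLAIM (what is proved, stated in full; the proofs are below) =====
def Claim_equal_creating_list_lists : Prop := ∀ (nums : List Int), Dom_creating_list_lists nums → Spec_creating_list_lists nums (creating_list_lists nums)

-- ===== LEMMAS AND PROOFS =====

-- the greedy strictly-increasing chain collected after current value v
def chainOf (v : Int) : List Int → List Int
  | [] => []
  | x :: xs => if x > v then x :: chainOf x xs else chainOf v xs

-- the value held in `some` at the end of A's inner loop
def chainLast (v : Int) : List Int → Int
  | [] => v
  | x :: xs => if x > v then chainLast x xs else chainLast v xs

-- the full greedy chain of a (sub)list starting at its head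
def chainFull : List Int → List Int
  | [] => []
  | x :: xs => x :: chainOf x xs

-- the nonempty suffixes of a list, longest first
def suffs : List Int → List (List Int)
  | [] => []
  | x :: xs => (x :: xs) :: suffs xs

theorem chainOf_eq_dropLe (ys : List Int) : ∀ (v y : Int), y ≤ v →
    chainOf v ys = pvDropLe v (chainOf y ys) := by
  induction ys with
  | nil => intro v y _; simp [chainOf, pvDropLe]
  | cons z zs ih =>
    intro v y hyv
    by_cases hzv : z > v
    · have hzy : z > y := lt_of_le_of_lt hyv hzv
      simp [chainOf, hzv, hzy, pvDropLe, not_le.mpr hzv]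
    · rw [not_lt] at hzv
      by_cases hzy : z > y
      · simp only [chainOf, if_pos hzy, if_neg (not_lt.mpr hzv), pvDropLe, if_pos hzv]
        exact ih v z hzv
      · simp only [chainOf, if_neg hzy, if_neg (not_lt.mpr hzv)]
        exact ih v y hyv

theorem chainFull_cons (x : Int) (xs : List Int) :
    chainFull (x :: xs) = x :: pvDropLe x (chainFull xs) := by
  cases xs with
  | nil => simp [chainFull, chainOf, pvDropLe]
  | cons y ys =>
    by_cases hyx : y ≤ x
    · simp only [chainFull, chainOf, if_neg (not_lt.mpr hyx), pvDropLe, if_pos hyx]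
      exact congrArg (x :: ·) (chainOf_eq_dropLe ys x y hyx)
    · rw [not_le] at hyx
      simp [chainFull, chainOf, if_pos hyx, pvDropLe, if_neg (not_le.mpr hyx)]

theorem bfold_eq (l : List Int) :
    l.foldr (fun x (st : List Int × List (List Int)) =>
        (x :: pvDropLe x st.1, st.2 ++ [x :: pvDropLe x st.1])) ([], []) =
      (chainFull l, ((suffs l).map chainFull).reverse) := by
  induction l with
  | nil => simp [chainFull, suffs]
  | cons x xs ih =>
    simp only [List.foldr_cons, ih, suffs, List.map_cons, List.reverse_cons]
    rw [← chainFull_cons]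

theorem alt_eq (nums : List Int) :
    creating_list_lists_alt nums =
      ((suffs nums).map chainFull).filter (fun r => decide (r.length > 1)) := by
  show ((nums.reverse.foldl
      (fun (st : List Int × List (List Int)) x =>
        (x :: pvDropLe x st.1, st.2 ++ [x :: pvDropLe x st.1])) ([], [])).2.reverse).filter
      (fun r => decide (r.length > 1)) = _
  rw [List.foldl_reverse]
  rw [bfold_eq nums]
  simp

theorem inner_fold_eq : ∀ (l : List Int) (v : Int) (acc : List Int),
    l.foldl (fun (p : Int × List Int) x => if x > p.1 then (x, p.2 ++ [x]) else p) (v, acc) =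
      (chainLast v l, acc ++ chainOf v l) := by
  intro l
  induction l with
  | nil => intro v acc; simp [chainLast, chainOf]
  | cons x xs ih =>
    intro v acc
    by_cases h : x > v
    · simp only [List.foldl_cons, if_pos h, ih, chainLast, chainOf, List.append_assoc,
        List.singleton_append]
    · simp only [List.foldl_cons, if_neg h, ih, chainLast, chainOf]

theorem map_drop_eq_suffs (l : List Int) :
    (List.range l.length).map (fun k => chainFull (l.drop k)) = (suffs l).map chainFull := by
  induction l with
  | nil => simp [suffs]
  | cons x xs ih =>
    rw [List.length_cons, List.range_succ_eq_map]
    simp only [List.map_cons, List.map_map, suffs, List.drop_zero]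
    have h2 : (List.range xs.length).map ((fun k => chainFull ((x :: xs).drop k)) ∘ Nat.succ) =
        (suffs xs).map chainFull := by
      simpa [Function.comp, List.drop_succ_cons] using ih
    rw [h2]

theorem a_eq (nums : List Int) :
    creating_list_lists nums =
      ((suffs nums).map chainFull).filter (fun r => decide (r.length > 1)) := by
  unfold creating_list_lists
  simp only [PySem.List.len_eq]
  rw [PySem.List.pyRange_zero_nat, List.foldl_map]
  refine (PySem.List.foldl_congr_mem _ _
    (fun (numbers : List (List Int)) (k : Nat) =>
      if (chainFull (nums.drop k)).length > 1 then numbers ++ [chainFull (nums.drop k)]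
      else numbers) [] ?_).trans ?_
  · intro acc k hk
    rw [List.mem_range] at hk
    have h0 : (0 : Int) ≤ (k : Int) + 1 := by positivity
    have hget : PySem.List.pyGetD nums (k : Int) 0 = nums[k] := by
      rw [PySem.List.pyGetD_natCast]; exact List.getD_eq_getElem nums 0 hk
    have ht : ((k : Int) + 1).toNat = k + 1 := by omega
    simp only [hget,
      fun init => PySem.List.foldl_pyRange_pyGetD' nums 0
        (fun (p : Int × List Int) x => if x > p.1 then (x, p.2 ++ [x]) else p) init h0,
      inner_fold_eq, ht, List.singleton_append]
    rw [List.drop_eq_getElem_cons hk]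
    rfl
  · have h := PySem.List.foldl_append_if (fun k : Nat => decide ((chainFull (nums.drop k)).length > 1))
      (fun k => chainFull (nums.drop k)) (List.range nums.length) ([] : List (List Int))
    simp only [decide_eq_true_eq] at h
    rw [h, List.nil_append, ← map_drop_eq_suffs, List.filter_map]
    rfl

-- ===== VERDICT (by name: the statement is the Claim_ definition above) =====
theorem creating_list_lists_spec : Claim_equal_creating_list_lists := by
  intro nums _
  unfold Spec_creating_list_lists
  rw [a_eq, alt_eq]
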